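-- pv_equiv track=rewrite | github.com/bsungwoo/STopover | STopover/make_original_dendrogram_cc.py | extract_connected_nodes
-- ===== SOURCE A (Python) =====
-- def extract_connected_nodes(edge_list, sel_node_idx):
--     '''
--     ## Extract node indices of a connected component which contains a selected node
--     (Algorithm is identical to python networkx _plain_bfs function)
--     ### Input
--     edge_list: list containing array of all nodes connected with each node
--     idx: index of the selected node (from 0 to node number)
--
--     ### Output
--     set of nodes constituting the connected components containing the selected node
--     '''
--     cc_set = set()
--     next_neighbor = {sel_node_idx}
--     while next_neighbor:
--         curr_neighbor = next_neighbor
--         next_neighbor = set()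
--         cc_set.update(curr_neighbor)
--         for node in curr_neighbor:
--             next_neighbor.update(n for n in edge_list[node] if n not in cc_set)
--     return cc_set
-- ===== SOURCE B (Python) =====
-- def extract_connected_nodes(edge_list, sel_node_idx):
--     '''Flat scan: cc is one growing list that is its own FIFO queue (an index pointer
--     walks it); each step appends the deduplicated, not-yet-seen neighbors of cc[i].'''
--     cc = [sel_node_idx]
--     i = 0
--     while i < len(cc):
--         cc += [n for n in dict.fromkeys(edge_list[cc[i]]) if n not in cc]
--         i += 1
--     return set(cc)
-- ===== Notes on version B (the rewrite author's own statement) =====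
-- stated objective: simpler
-- what changed: Replaces A's two-level loop maintaining separate cc/current/next frontier sets with one flat index-pointer scan over a single growing list that is simultaneously the visited set and the FIFO queue, appending dict.fromkeys-deduplicated unseen neighbors per node.
import Mathlib
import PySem

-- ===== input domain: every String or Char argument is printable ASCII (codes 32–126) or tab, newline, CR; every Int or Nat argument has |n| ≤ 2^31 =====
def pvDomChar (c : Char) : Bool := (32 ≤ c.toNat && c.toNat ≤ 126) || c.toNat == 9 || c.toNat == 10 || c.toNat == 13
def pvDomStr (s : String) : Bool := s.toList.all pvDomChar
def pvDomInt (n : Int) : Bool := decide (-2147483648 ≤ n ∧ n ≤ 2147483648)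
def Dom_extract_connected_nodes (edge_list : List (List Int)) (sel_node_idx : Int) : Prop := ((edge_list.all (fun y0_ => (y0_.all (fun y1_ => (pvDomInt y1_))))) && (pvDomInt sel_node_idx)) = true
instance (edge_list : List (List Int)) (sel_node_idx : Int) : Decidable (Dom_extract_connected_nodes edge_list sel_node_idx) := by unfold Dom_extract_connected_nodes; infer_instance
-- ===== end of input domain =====

-- B replaces A's two-frontier-set level loop with one flat index-pointer scan over a single
-- growing list that is both visited set and queue; objective: simpler decomposition.


-- ===== PORT A =====
-- edge_list[node]; the [] default is reached only outside Pre_ (Python raises IndexError there)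
def pvNbrs (edge_list : List (List Int)) (node : Int) : List Int :=
  (PySem.List.pyGet? edge_list node).getD []

-- the while-loop of A: cc_set and the two frontier sets; fuel bounds the number of levels
-- (sets are consumed in insertion order; the returned value is order-independent as a set)
def pvLoopA (edge_list : List (List Int)) : Nat → PySem.Set Int → PySem.Set Int → List Int
  | _, cc, [] => cc
  | 0, cc, _ => cc
  | fuel + 1, cc, next =>
    let curr := next
    let cc' := PySem.Set.update cc curr
    let next' := curr.foldl
      (fun ns node => (pvNbrs edge_list node).foldl
        (fun ns n => if PySem.Set.contains cc' n then ns else PySem.Set.add ns n) ns)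
      PySem.Set.empty
    pvLoopA edge_list fuel cc' next'

def extract_connected_nodes (edge_list : List (List Int)) (sel_node_idx : Int) : List Int :=
  pvLoopA edge_list ((edge_list.flatMap id).length + 2)
    PySem.Set.empty (PySem.Set.add PySem.Set.empty sel_node_idx)

-- ===== PORT B =====
-- the list comprehension: dict.fromkeys dedup, then the 'n not in cc' filter
def pvComp (cc ns : List Int) : List Int :=
  (PySem.List.dedup ns).filter (fun n => decide (n ∉ cc))

-- B's 'while i < len(cc)' loop: i walks the growing list cc; fuel bounds the pops
def pvScan (edge_list : List (List Int)) : Nat → List Int → Nat → List Int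
  | 0, cc, _ => cc
  | fuel + 1, cc, i =>
    if h : i < cc.length then
      pvScan edge_list fuel (cc ++ pvComp cc (pvNbrs edge_list cc[i])) (i + 1)
    else cc

def extract_connected_nodes_alt (edge_list : List (List Int)) (sel_node_idx : Int) : List Int :=
  PySem.Set.ofList (pvScan edge_list ((edge_list.flatMap id).length + 2) [sel_node_idx] 0)

-- ===== PRECONDITION & SPEC =====
-- Pre_ is exactly A's domain: A (and B) raise IndexError precisely when some node reachable from
-- sel_node_idx is out of range as a Python index.  Reachability is stated as a saturating
-- neighbourhood closure (an out-of-range node contributes no neighbours, since the traversal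
-- stops there); A's domain is genuinely reachability-dependent, so no flat bound on the entries
-- can express it.
def pvReach (edge_list : List (List Int)) (sel_node_idx : Int) : List Int :=
  (fun S => PySem.Set.update S (S.flatMap (fun node => (PySem.List.pyGet? edge_list node).getD [])))^[(edge_list.flatMap id).length + 1] [sel_node_idx]

def Pre_extract_connected_nodes (edge_list : List (List Int)) (sel_node_idx : Int) : Prop :=
  ∀ x ∈ pvReach edge_list sel_node_idx, PySem.Raise.InRange edge_list.length x
instance (edge_list : List (List Int)) (sel_node_idx : Int) : Decidable (Pre_extract_connected_nodes edge_list sel_node_idx) := by unfold Pre_extract_connected_nodes; infer_instance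
def pvWitness_extract_connected_nodes : List (List Int) × Int := ([[1], [0]], 0)

def Spec_extract_connected_nodes (edge_list : List (List Int)) (sel_node_idx : Int) (out : List Int) : Prop := out = extract_connected_nodes_alt edge_list sel_node_idx
instance (edge_list : List (List Int)) (sel_node_idx : Int) (out : List Int) : Decidable (Spec_extract_connected_nodes edge_list sel_node_idx out) := by unfold Spec_extract_connected_nodes; infer_instance

-- ===== CLAIM (what is proved, stated in full; the proofs are below) =====
def Claim_equal_extract_connected_nodes : Prop := ∀ (edge_list : List (List Int)) (sel_node_idx : Int), Dom_extract_connected_nodes edge_list sel_node_idx → Pre_extract_connected_nodes edge_list sel_node_idx → Spec_extract_connected_nodes edge_list sel_node_idx (extract_connected_nodes edge_list sel_node_idx)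

-- ===== LEMMAS AND PROOFS =====

-- the new (previously unseen) elements of ns, scanned left to right against a growing seen list
def pvNew (seen : List Int) : List Int → List Int
  | [] => []
  | n :: ns => if n ∈ seen then pvNew seen ns else n :: pvNew (seen ++ [n]) ns

-- the new elements contributed by a whole frontier, node by node
def pvNEN (edge_list : List (List Int)) (seen : List Int) : List Int → List Int
  | [] => []
  | node :: front =>
    let t := pvNew seen (pvNbrs edge_list node)
    t ++ pvNEN edge_list (seen ++ t) front

theorem pv_A1 (cc : List Int) (ns : List Int) : ∀ (nx : List Int),
    ns.foldl (fun ns' n => if PySem.Set.contains cc n then ns' else PySem.Set.add ns' n) nx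
      = nx ++ pvNew (cc ++ nx) ns := by
  induction ns with
  | nil => intro nx; simp [pvNew]
  | cons n ns ih =>
    intro nx
    by_cases hc : n ∈ cc
    · simpa [pvNew, hc, PySem.Set.contains_iff] using ih nx
    · by_cases hx : n ∈ nx
      · simp only [List.foldl, pvNew, PySem.Set.contains_iff, hc,
          PySem.Set.add_of_mem hx]
        simpa [hc, hx, List.mem_append] using ih nx
      · have hm : n ∉ cc ++ nx := by simp [List.mem_append, hc, hx]
        simp only [List.foldl, pvNew, PySem.Set.contains_iff, hc,
          PySem.Set.add_of_not_mem hx, hm]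
        simpa [List.append_assoc] using ih (nx ++ [n])

theorem pv_A2 (edge_list : List (List Int)) (front : List Int) : ∀ (cc nx : List Int),
    front.foldl (fun ns node => (pvNbrs edge_list node).foldl
        (fun ns n => if PySem.Set.contains cc n then ns else PySem.Set.add ns n) ns) nx
      = nx ++ pvNEN edge_list (cc ++ nx) front := by
  induction front with
  | nil => intro cc nx; simp [pvNEN]
  | cons node front ih =>
    intro cc nx
    rw [List.foldl_cons, pv_A1 cc (pvNbrs edge_list node) nx,
      ih cc (nx ++ pvNew (cc ++ nx) (pvNbrs edge_list node))]
    simp [pvNEN, List.append_assoc]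

-- filter commutes through the growing-seen dedup when p respects the two accumulators
theorem pv_filter_new (p : Int → Prop) [DecidablePred p] (ns : List Int) :
    ∀ (a b : List Int), (∀ x, p x → (x ∈ a ↔ x ∈ b)) →
    (pvNew a ns).filter (fun n => decide (p n)) = pvNew b (ns.filter (fun n => decide (p n))) := by
  induction ns with
  | nil => intro a b _; simp [pvNew]
  | cons n ns ih =>
    intro a b hab
    by_cases hp : p n
    · rw [List.filter_cons_of_pos (by simpa using hp)]
      by_cases ha : n ∈ a
      · have hb : n ∈ b := (hab n hp).mp ha
        rw [show pvNew a (n :: ns) = pvNew a ns from by simp [pvNew, ha],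
          show pvNew b (n :: ns.filter (fun n => decide (p n)))
            = pvNew b (ns.filter (fun n => decide (p n))) from by simp [pvNew, hb]]
        exact ih a b hab
      · have hb : n ∉ b := fun hnb => ha ((hab n hp).mpr hnb)
        rw [show pvNew a (n :: ns) = n :: pvNew (a ++ [n]) ns from by simp [pvNew, ha],
          show pvNew b (n :: ns.filter (fun n => decide (p n)))
            = n :: pvNew (b ++ [n]) (ns.filter (fun n => decide (p n))) from by simp [pvNew, hb],
          List.filter_cons_of_pos (by simpa using hp)]
        congr 1
        exact ih (a ++ [n]) (b ++ [n]) (by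
          intro x hx; simp only [List.mem_append, List.mem_singleton]
          exact or_congr (hab x hx) Iff.rfl)
    · rw [List.filter_cons_of_neg (by simpa using hp)]
      by_cases ha : n ∈ a
      · rw [show pvNew a (n :: ns) = pvNew a ns from by simp [pvNew, ha]]
        exact ih a b hab
      · rw [show pvNew a (n :: ns) = n :: pvNew (a ++ [n]) ns from by simp [pvNew, ha],
          List.filter_cons_of_neg (by simpa using hp)]
        exact ih (a ++ [n]) b (by
          intro x hx
          have hxn : x ≠ n := fun he => hp (he ▸ hx)
          simp only [List.mem_append, List.mem_singleton, hxn, or_false]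
          exact hab x hx)

theorem pv_new_not_mem (ns : List Int) : ∀ (seen : List Int) (x : Int),
    x ∈ pvNew seen ns → x ∉ seen := by
  induction ns with
  | nil => intro seen x h; simp [pvNew] at h
  | cons n ns ih =>
    intro seen x h
    by_cases hn : n ∈ seen
    · exact ih seen x (by simpa [pvNew, hn] using h)
    · simp only [pvNew, hn, if_neg, not_false_iff, List.mem_cons] at h
      rcases h with h | h
      · exact h ▸ hn
      · have := ih (seen ++ [n]) x h
        simp only [List.mem_append] at this
        exact fun hx => this (Or.inl hx)

theorem pv_new_filter_self (seen : List Int) (ns : List Int) :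
    (pvNew seen ns).filter (fun n => decide (n ∉ seen)) = pvNew seen ns := by
  apply List.filter_eq_self.mpr
  intro x hx
  simpa using pv_new_not_mem ns seen x hx

theorem pv_ofList_eq_new (ns : List Int) : PySem.Set.ofList ns = pvNew [] ns := by
  have h : ∀ (ns acc : List Int), ns.foldl PySem.Set.add acc = acc ++ pvNew acc ns := by
    intro ns
    induction ns with
    | nil => intro acc; simp [pvNew]
    | cons n ns ih =>
      intro acc
      by_cases hn : n ∈ acc
      · simpa [pvNew, hn, PySem.Set.add_of_mem hn] using ih acc
      · simp only [List.foldl, pvNew, hn, if_neg, not_false_iff,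
          PySem.Set.add_of_not_mem hn]
        simpa [List.append_assoc] using ih (acc ++ [n])
  simpa using h ns []

-- the comprehension of B computes exactly the growing-seen dedup against the full cc
theorem pv_comp_eq_new (cc ns : List Int) : pvComp cc ns = pvNew cc ns := by
  unfold pvComp
  rw [PySem.List.dedup_eq_ofList, pv_ofList_eq_new]
  rw [pv_filter_new (fun n => n ∉ cc) ns [] cc (by intro x hx; simp [hx])]
  rw [← pv_filter_new (fun n => n ∉ cc) ns cc cc (fun _ _ => Iff.rfl)]
  exact pv_new_filter_self cc ns

theorem pv_new_nodup (ns : List Int) : ∀ (seen : List Int), seen.Nodup →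
    (seen ++ pvNew seen ns).Nodup := by
  induction ns with
  | nil => intro seen h; simpa [pvNew]
  | cons n ns ih =>
    intro seen h
    by_cases hn : n ∈ seen
    · simpa [pvNew, hn] using ih seen h
    · have h1 : (seen ++ [n]).Nodup := by
        simp only [List.nodup_append, List.nodup_cons, List.not_mem_nil,
          not_false_iff, List.nodup_nil, true_and, and_true]
        refine ⟨h, ?_⟩
        intro a ha b hb
        simp only [List.mem_singleton] at hb
        subst hb
        exact fun he => hn (he ▸ ha)
      have := ih (seen ++ [n]) h1
      simpa [pvNew, hn, List.append_assoc] using this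

theorem pv_new_sub (ns : List Int) : ∀ (seen : List Int) (x : Int),
    x ∈ pvNew seen ns → x ∈ ns := by
  induction ns with
  | nil => intro seen x h; simp [pvNew] at h
  | cons n ns ih =>
    intro seen x h
    by_cases hn : n ∈ seen
    · simp only [pvNew, hn, if_pos] at h
      exact List.mem_cons_of_mem _ (ih seen x h)
    · simp only [pvNew, hn, if_neg, not_false_iff, List.mem_cons] at h
      rcases h with h | h
      · simp [h]
      · exact List.mem_cons_of_mem _ (ih (seen ++ [n]) x h)

theorem pv_NEN_nodup (edge_list : List (List Int)) (front : List Int) :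
    ∀ (seen : List Int), seen.Nodup → (seen ++ pvNEN edge_list seen front).Nodup := by
  induction front with
  | nil => intro seen h; simpa [pvNEN]
  | cons node front ih =>
    intro seen h
    have h1 := pv_new_nodup (pvNbrs edge_list node) seen h
    have := ih (seen ++ pvNew seen (pvNbrs edge_list node)) h1
    simpa [pvNEN, List.append_assoc] using this

theorem pv_NEN_sub (edge_list : List (List Int)) (front : List Int) :
    ∀ (seen : List Int) (x : Int), x ∈ pvNEN edge_list seen front → x ∈ edge_list.flatMap id := by
  induction front with
  | nil => intro seen x h; simp [pvNEN] at h
  | cons node front ih =>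
    intro seen x h
    simp only [pvNEN, List.mem_append] at h
    rcases h with h | h
    · have hx : x ∈ pvNbrs edge_list node := pv_new_sub _ _ _ h
      unfold pvNbrs at hx
      cases hg : PySem.List.pyGet? edge_list node with
      | none => rw [hg] at hx; simp at hx
      | some row =>
        rw [hg] at hx; simp at hx
        have hrow : row ∈ edge_list := PySem.List.mem_of_pyGet?_eq_some _ hg
        exact List.mem_flatMap.mpr ⟨row, hrow, by simpa using hx⟩
    · exact ih _ _ h

theorem pv_len_le (l U : List Int) (hn : l.Nodup) (hs : ∀ x ∈ l, x ∈ U) :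
    l.length ≤ U.length := by
  classical
  calc l.length = l.toFinset.card := (List.toFinset_card_of_nodup hn).symm
    _ ≤ U.toFinset.card := Finset.card_le_card (fun x hx => by
        simp only [List.mem_toFinset] at *
        exact hs x hx)
    _ ≤ U.length := U.toFinset_card_le

-- front.length pops of B's flat scan perform one whole level of A
theorem pv_B2 (edge_list : List (List Int)) (front : List Int) :
    ∀ (fuel : Nat) (pre tail : List Int),
    pvScan edge_list (front.length + fuel) (pre ++ front ++ tail) pre.length
      = pvScan edge_list fuel
          (pre ++ front ++ tail ++ pvNEN edge_list (pre ++ front ++ tail) front)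
          (pre.length + front.length) := by
  induction front with
  | nil => intro fuel pre tail; simp [pvNEN]
  | cons node rest ih =>
    intro fuel pre tail
    have hlt : pre.length < (pre ++ (node :: rest) ++ tail).length := by
      simp only [List.length_append, List.length_cons]; omega
    have hget : (pre ++ (node :: rest) ++ tail)[pre.length]'hlt = node := by
      rw [List.getElem_append_left (by simp)]
      rw [List.getElem_append_right (by omega)]
      simp
    have hstep : pvScan edge_list (rest.length + fuel + 1) (pre ++ (node :: rest) ++ tail) pre.length
        = pvScan edge_list (rest.length + fuel)
            ((pre ++ (node :: rest) ++ tail) ++ pvComp (pre ++ (node :: rest) ++ tail) (pvNbrs edge_list node))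
            (pre.length + 1) := by
      simp only [pvScan, hlt, dif_pos, hget]
    simp only [List.length_cons]
    have harith : rest.length + 1 + fuel = rest.length + fuel + 1 := by omega
    rw [harith, hstep, pv_comp_eq_new]
    set t := pvNew (pre ++ (node :: rest) ++ tail) (pvNbrs edge_list node) with ht
    have hre : (pre ++ (node :: rest) ++ tail) ++ t = (pre ++ [node]) ++ rest ++ (tail ++ t) := by
      simp [List.append_assoc]
    have hi : pre.length + 1 = (pre ++ [node]).length := by simp
    rw [hre, hi, ih fuel (pre ++ [node]) (tail ++ t)]
    have hseen : (pre ++ [node]) ++ rest ++ (tail ++ t) = (pre ++ (node :: rest) ++ tail) ++ t := by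
      simp [List.append_assoc]
    rw [hseen]
    congr 1
    · simp only [pvNEN, ← ht]
      simp [List.append_assoc]
    · simp [List.length_append]; omega

theorem pv_main (edge_list : List (List Int)) (sel : Int) :
    ∀ (fA : Nat) (fB : Nat) (cc next : List Int),
    (cc ++ next).Nodup →
    (∀ x ∈ cc ++ next, x ∈ sel :: edge_list.flatMap id) →
    fA + (cc ++ next).length ≥ (sel :: edge_list.flatMap id).length + 1 →
    fB + (cc ++ next).length ≥ (sel :: edge_list.flatMap id).length + next.length →
    pvLoopA edge_list fA cc next = pvScan edge_list fB (cc ++ next) cc.length := by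
  intro fA
  induction fA with
  | zero =>
    intro fB cc next hnd hsub hA hB
    cases next with
    | nil =>
      cases fB with
      | zero => simp [pvLoopA, pvScan]
      | succ f =>
        simp only [pvLoopA, List.append_nil, pvScan]
        rw [dif_neg (by omega)]
    | cons q qs =>
      exfalso
      have hle := pv_len_le (cc ++ q :: qs) (sel :: edge_list.flatMap id) hnd hsub
      simp only [Nat.zero_add] at hA
      omega
  | succ f ih =>
    intro fB cc next hnd hsub hA hB
    cases next with
    | nil =>
      cases fB with
      | zero => simp [pvLoopA, pvScan]
      | succ g =>
        simp only [pvLoopA, List.append_nil, pvScan]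
        rw [dif_neg (by omega)]
    | cons q qs =>
      have hle := pv_len_le (cc ++ q :: qs) (sel :: edge_list.flatMap id) hnd hsub
      obtain ⟨hcc, hqs, hdisj⟩ := List.nodup_append.mp hnd
      have hupd : PySem.Set.update cc (q :: qs) = cc ++ q :: qs :=
        PySem.Set.update_eq_append_of_disjoint cc (q :: qs) hqs
          (fun x hx hxc => hdisj x hxc x hx rfl)
      -- one level of A = pvNEN of the frontier
      have hAstep : pvLoopA edge_list (f + 1) cc (q :: qs)
          = pvLoopA edge_list f (cc ++ q :: qs)
              (pvNEN edge_list (cc ++ q :: qs) (q :: qs)) := by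
        simp only [pvLoopA, hupd]
        rw [pv_A2 edge_list (q :: qs) (cc ++ q :: qs) PySem.Set.empty]
        simp [PySem.Set.empty]
      -- |next| pops of B = the same pvNEN
      have hfBN : (q :: qs).length ≤ fB := by
        have := hB; simp only [List.length_append] at this hle ⊢; omega
      have hBstep : pvScan edge_list fB (cc ++ q :: qs) cc.length
          = pvScan edge_list (fB - (q :: qs).length)
              ((cc ++ q :: qs) ++ pvNEN edge_list (cc ++ q :: qs) (q :: qs))
              (cc.length + (q :: qs).length) := by
        have hsplit : fB = (q :: qs).length + (fB - (q :: qs).length) := by omega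
        rw [hsplit]
        have := pv_B2 edge_list (q :: qs) (fB - (q :: qs).length) cc []
        simpa [List.append_assoc] using this
      rw [hAstep, hBstep]
      have hlen : (cc ++ q :: qs).length = cc.length + (q :: qs).length := by
        simp [List.length_append]
      rw [← hlen]
      cases hne : pvNEN edge_list (cc ++ q :: qs) (q :: qs) with
      | nil =>
        cases f with
        | zero =>
          cases hf : fB - (q :: qs).length with
          | zero => simp [pvLoopA, pvScan]
          | succ g =>
            simp only [pvLoopA, List.append_nil, pvScan]
            rw [dif_neg (by omega)]
        | succ f' =>
          cases hf : fB - (q :: qs).length with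
          | zero => simp [pvLoopA, pvScan]
          | succ g =>
            simp only [pvLoopA, List.append_nil, pvScan]
            rw [dif_neg (by omega)]
      | cons y ys =>
        rw [← hne]
        apply ih
        · exact pv_NEN_nodup edge_list (q :: qs) (cc ++ q :: qs) hnd
        · intro x hx
          rcases List.mem_append.mp hx with hx | hx
          · exact hsub x hx
          · exact List.mem_cons_of_mem _ (pv_NEN_sub edge_list (q :: qs) _ x hx)
        · have hlen1 : 1 ≤ (pvNEN edge_list (cc ++ q :: qs) (q :: qs)).length := by
            rw [hne]; simp
          simp only [List.length_append] at hA hle ⊢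
          omega
        · simp only [List.length_append] at hB hle ⊢
          omega

-- B's flat scan keeps its list duplicate-free, so the final set(cc) is the list itself
theorem pv_scan_nodup (edge_list : List (List Int)) :
    ∀ (fuel : Nat) (cc : List Int) (i : Nat), cc.Nodup → (pvScan edge_list fuel cc i).Nodup := by
  intro fuel
  induction fuel with
  | zero => intro cc i h; simpa [pvScan]
  | succ f ih =>
    intro cc i h
    by_cases hlt : i < cc.length
    · simp only [pvScan, hlt, dif_pos]
      apply ih
      rw [pv_comp_eq_new]
      exact pv_new_nodup _ cc h
    · simpa [pvScan, hlt] using h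

-- ===== VERDICT (by name: the statement is the Claim_ definition above) =====
theorem extract_connected_nodes_spec : Claim_equal_extract_connected_nodes := by
  intro edge_list sel _ _
  show extract_connected_nodes edge_list sel = extract_connected_nodes_alt edge_list sel
  unfold extract_connected_nodes extract_connected_nodes_alt
  have h0 : PySem.Set.add PySem.Set.empty sel = [sel] := by
    simp [PySem.Set.empty]
  rw [h0, show (PySem.Set.empty : PySem.Set Int) = ([] : List Int) from rfl]
  have hmain := pv_main edge_list sel ((edge_list.flatMap id).length + 2)
      ((edge_list.flatMap id).length + 2) [] [sel]
      (by simp) (by intro x hx; simp at hx; simp [hx])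
      (by simp) (by simp)
  simp only [List.nil_append, List.length_nil] at hmain
  rw [hmain, PySem.Set.ofList_eq_self_of_nodup]
  exact pv_scan_nodup edge_list _ [sel] 0 (by simp)
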